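-- pv_equiv track=rewrite | github.com/codepharmer/m_weber_dashboard | streamlit_dashboard.py | map_keywords_to_themes
-- ===== SOURCE A (Python) =====
-- from typing import List, Dict, Tuple, Any, Optional, Set
--
-- def map_keywords_to_themes(keywords: List[str], theme_map: Dict[str, List[str]]) -> Set[str]:
--     """Maps a list of keywords to predefined themes."""
--     themes = set()
--     if not isinstance(keywords, list):
--         return themes
--     for keyword in keywords:
--         if not isinstance(keyword, str):
--             continue
--         kw_lower = keyword.lower()
--         for theme, theme_kws in theme_map.items():
--             if kw_lower in theme_kws:
--                 themes.add(theme)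
--     return themes if themes else {"Other"} # Assign to 'Other' if no theme matched
-- ===== SOURCE B (Python) =====
-- from typing import List, Dict, Set
--
-- def map_keywords_to_themes(keywords: List[str], theme_map: Dict[str, List[str]]) -> Set[str]:
--     """Maps a list of keywords to predefined themes via a precomputed inverted index."""
--     pairs = [(kw, theme) for theme, theme_kws in theme_map.items() for kw in theme_kws]
--     index = {}
--     for kw, theme in pairs:
--         index[kw] = index.get(kw, []) + [theme]
--     themes = set()
--     for keyword in keywords:
--         for theme in index.get(keyword.lower(), []):
--             themes.add(theme)
--     return themes if themes else {"Other"}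
-- ===== Notes on version B (the rewrite author's own statement) =====
-- stated objective: faster
-- what changed: B precomputes an inverted index (keyword -> list of themes) from theme_map once and then does one dict lookup per keyword, instead of A's scan of every theme's keyword list for every keyword.
import Mathlib
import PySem

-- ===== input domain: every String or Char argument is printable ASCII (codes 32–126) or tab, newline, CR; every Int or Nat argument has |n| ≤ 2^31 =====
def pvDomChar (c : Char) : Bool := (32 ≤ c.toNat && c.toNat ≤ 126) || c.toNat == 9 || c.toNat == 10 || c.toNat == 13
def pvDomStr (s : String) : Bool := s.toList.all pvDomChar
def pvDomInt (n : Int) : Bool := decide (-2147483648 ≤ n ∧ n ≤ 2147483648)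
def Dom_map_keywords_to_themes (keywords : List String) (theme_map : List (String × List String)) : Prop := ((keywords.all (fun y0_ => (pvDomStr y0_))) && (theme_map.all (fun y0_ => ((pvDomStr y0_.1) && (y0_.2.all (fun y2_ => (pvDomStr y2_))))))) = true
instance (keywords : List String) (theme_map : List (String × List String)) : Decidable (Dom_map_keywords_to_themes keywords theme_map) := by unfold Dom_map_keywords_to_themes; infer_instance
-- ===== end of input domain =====

-- B replaces A's per-keyword scan over the whole theme_map by a precomputed inverted index
-- (keyword -> list of themes), one dict lookup per keyword: asymptotically faster.


-- ===== PORT A =====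
-- the isinstance guards are always-true type checks under the List String typing, so they vanish
def map_keywords_to_themes (keywords : List String) (theme_map : List (String × List String)) : List String :=
  let themes : PySem.Set String :=
    keywords.foldl (fun themes keyword =>
      let kw_lower := PySem.Str.lower keyword
      theme_map.foldl (fun themes p =>
        if p.2.contains kw_lower then PySem.Set.add themes p.1 else themes) themes)
      PySem.Set.empty
  if themes = [] then PySem.Set.add PySem.Set.empty "Other" else themes

-- ===== PORT B =====
def map_keywords_to_themes_alt (keywords : List String) (theme_map : List (String × List String)) : List String :=
  let pairs : List (String × String) :=
    theme_map.flatMap (fun p => p.2.map (fun kw => (kw, p.1)))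
  let index : PySem.Dict String (List String) :=
    pairs.foldl (fun d q => d.modify q.1 [] (· ++ [q.2])) PySem.Dict.empty
  let themes : PySem.Set String :=
    keywords.foldl (fun themes keyword =>
      (index.getD (PySem.Str.lower keyword) []).foldl PySem.Set.add themes)
      PySem.Set.empty
  if themes = [] then PySem.Set.add PySem.Set.empty "Other" else themes

-- ===== PRECONDITION & SPEC =====
def Spec_map_keywords_to_themes (keywords : List String) (theme_map : List (String × List String)) (out : List String) : Prop := out = map_keywords_to_themes_alt keywords theme_map
instance (keywords : List String) (theme_map : List (String × List String)) (out : List String) : Decidable (Spec_map_keywords_to_themes keywords theme_map out) := by unfold Spec_map_keywords_to_themes; infer_instance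

-- ===== CLAIM (what is proved, stated in full; the proofs are below) =====
def Claim_equal_map_keywords_to_themes : Prop := ∀ (keywords : List String) (theme_map : List (String × List String)), Dom_map_keywords_to_themes keywords theme_map → Spec_map_keywords_to_themes keywords theme_map (map_keywords_to_themes keywords theme_map)

-- ===== LEMMAS AND PROOFS =====

-- set.add is idempotent on repeated insertions
theorem foldl_add_replicate (t : String) (n : Nat) (s : PySem.Set String) :
    (List.replicate n t).foldl PySem.Set.add s = if n = 0 then s else PySem.Set.add s t := by
  induction n generalizing s with
  | zero => simp
  | succ m ih =>
    rw [List.replicate_succ, List.foldl_cons, ih]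
    cases m with
    | zero => simp
    | succ k =>
      simp only [Nat.succ_ne_zero, if_false]
      apply PySem.Set.add_of_mem
      simp [PySem.Set.add_eq_ite]; split <;> simp_all

-- folding Set.add over the themes contributed by one theme's keyword list = one conditional add
theorem foldl_add_filter_const (t c : String) (kws : List String) (s : PySem.Set String) :
    ((kws.filter (fun k => k == c)).map (fun _ => t)).foldl PySem.Set.add s
      = if kws.contains c then PySem.Set.add s t else s := by
  rw [List.map_const', foldl_add_replicate]
  by_cases h : c ∈ kws
  · have : (kws.filter (fun k => k == c)).length ≠ 0 := by
      simp only [ne_eq, List.length_eq_zero_iff, List.filter_eq_nil_iff]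
      push Not
      exact ⟨c, h, by simp⟩
    simp [this, h]
  · have : kws.filter (fun k => k == c) = [] := by
      rw [List.filter_eq_nil_iff]
      intro a ha hb
      exact h (by simpa using (beq_iff_eq.mp hb) ▸ ha)
    simp [this, h]

-- the per-keyword inner loop of A equals folding Set.add over the inverted-index entry
theorem inner_eq (theme_map : List (String × List String)) (c : String) (s : PySem.Set String) :
    theme_map.foldl (fun themes p =>
        if p.2.contains c then PySem.Set.add themes p.1 else themes) s
      = (((theme_map.flatMap (fun p => p.2.map (fun kw => (kw, p.1)))).filter
            (fun q => q.1 == c)).map (·.2)).foldl PySem.Set.add s := by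
  induction theme_map generalizing s with
  | nil => simp
  | cons p rest ih =>
    simp only [List.foldl_cons, List.flatMap_cons, List.filter_append, List.map_append,
      List.foldl_append]
    rw [ih]
    congr 1
    have h2 : ((p.2.map (fun kw => (kw, p.1))).filter (fun q => q.1 == c)).map (·.2)
        = (p.2.filter (fun k => k == c)).map (fun _ => p.1) := by
      simp [List.filter_map, List.map_map, Function.comp_def]
    rw [h2, foldl_add_filter_const]

theorem map_keywords_to_themes_spec : Claim_equal_map_keywords_to_themes := by
  intro keywords theme_map hD
  clear hD
  unfold Spec_map_keywords_to_themes map_keywords_to_themes map_keywords_to_themes_alt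
  have h : ∀ s : PySem.Set String,
      keywords.foldl (fun themes keyword =>
        theme_map.foldl (fun themes p =>
          if p.2.contains (PySem.Str.lower keyword) then PySem.Set.add themes p.1 else themes)
          themes) s
      = keywords.foldl (fun themes keyword =>
          (((theme_map.flatMap (fun p => p.2.map (fun kw => (kw, p.1)))).foldl
              (fun d q => d.modify q.1 [] (· ++ [q.2])) PySem.Dict.empty).getD
            (PySem.Str.lower keyword) []).foldl PySem.Set.add themes) s := by
    intro s
    induction keywords generalizing s with
    | nil => rfl
    | cons kw rest ih =>
      simp only [List.foldl_cons]
      rw [ih]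
      congr 1
      rw [PySem.Dict.getD_foldl_modify_append, PySem.Dict.getD_empty, List.nil_append]
      exact inner_eq theme_map (PySem.Str.lower kw) s
  simp only [h]
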